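-- pv_equiv track=rewrite | github.com/nchikkam/projects | py/ftchr/pwd.py | solution
-- ===== SOURCE A (Python) =====
-- def match_pwd_criteria(pwd):
--     digits = ['0', '1', '2', '3', '4', '5', '6', '7', '8', '9']
--     upper_chars = [
--         'A', 'B', 'C', 'D', 'E', 'F', 'G', 'H', 'I', 'J',
--         'K', 'L', 'M', 'N', 'O', 'P', 'Q', 'R', 'S', 'T',
--         'U', 'V', 'W', 'X', 'Y', 'Z']
--     uppers_char_flag = False
--
--     for digit in digits:
--         if digit in pwd:
--             return False
--
--     for char in upper_chars:
--         if char in pwd: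
--             uppers_char_flag = True
--             break
--
--     return uppers_char_flag
--
-- def solution(S):
--     l = len(S)
--     sol = -1
--
--     for i in range(l+1):
--         for j in range(i, l+1):
--             pwd = []
--             for k in range(i, j):
--                 pwd.append(S[k])
--
--             if match_pwd_criteria(pwd):
--                 if len(pwd) > sol:
--                     sol = len(pwd)
--
--     return sol
-- ===== SOURCE B (Python) =====
-- def solution(S):
--     # Single left-to-right scan: split on digits, track length of the current
--     # digit-free segment and whether it contains an uppercase letter.
--     best = -1
--     cur = 0
--     has_upper = False
--     for c in S:
--         if '0' <= c <= '9':
--             cur = 0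
--             has_upper = False
--         else:
--             cur += 1
--             if 'A' <= c <= 'Z':
--                 has_upper = True
--             if has_upper and cur > best:
--                 best = cur
--     return best
-- ===== Notes on version B (the rewrite author's own statement) =====
-- stated objective: faster
-- what changed: Replaced the quadruple loop (all O(n^2) substrings, each rebuilt char-by-char and rescanned against digit/uppercase tables) by one linear scan that resets on digits and tracks the current segment length and whether it has seen an uppercase.
import Mathlib
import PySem

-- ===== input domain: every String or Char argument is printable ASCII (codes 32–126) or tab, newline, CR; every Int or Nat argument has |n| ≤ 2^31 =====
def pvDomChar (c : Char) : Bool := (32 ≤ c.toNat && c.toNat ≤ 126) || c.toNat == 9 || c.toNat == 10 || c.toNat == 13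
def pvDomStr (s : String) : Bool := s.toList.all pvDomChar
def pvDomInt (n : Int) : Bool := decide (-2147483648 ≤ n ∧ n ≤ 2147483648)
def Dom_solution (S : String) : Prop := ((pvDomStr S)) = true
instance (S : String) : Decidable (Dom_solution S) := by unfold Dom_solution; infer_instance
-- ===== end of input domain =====

-- B replaces A's quadruple loop over all substrings by one linear scan (asymptotically faster).

-- ===== PORT A =====
def pvDigits : List Char := ['0', '1', '2', '3', '4', '5', '6', '7', '8', '9']
def pvUpperChars : List Char :=
  ['A', 'B', 'C', 'D', 'E', 'F', 'G', 'H', 'I', 'J',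
   'K', 'L', 'M', 'N', 'O', 'P', 'Q', 'R', 'S', 'T',
   'U', 'V', 'W', 'X', 'Y', 'Z']

-- the two early-return membership loops rendered as List.any (exact: first hit decides)
def match_pwd_criteria (pwd : List Char) : Bool :=
  if pvDigits.any (fun d => pwd.contains d) then false
  else pvUpperChars.any (fun c => pwd.contains c)

def solution (S : String) : Int :=
  let l : Int := PySem.Str.len S
  (PySem.List.pyRange 0 (l + 1) 1).foldl (fun sol i =>
    (PySem.List.pyRange i (l + 1) 1).foldl (fun sol j =>
      let pwd : List Char :=
        (PySem.List.pyRange i j 1).foldl (fun acc k =>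
          -- S[k]: index always in range here, so the none (IndexError) branch is unreachable
          match PySem.Str.pyGet? S k with
          | some c => acc ++ [c]
          | none => acc) []
      if match_pwd_criteria pwd then
        if (pwd.length : Int) > sol then (pwd.length : Int) else sol
      else sol) sol) (-1)

-- ===== PORT B =====
def solution_alt (S : String) : Int :=
  (S.toList.foldl (fun (st : Int × Int × Bool) c =>
    let best := st.1
    let cur := st.2.1
    let hasU := st.2.2
    if '0' ≤ c ∧ c ≤ '9' then (best, 0, false)
    else
      let cur := cur + 1
      let hasU := hasU || decide ('A' ≤ c ∧ c ≤ 'Z')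
      if hasU ∧ cur > best then (cur, cur, hasU) else (best, cur, hasU))
    (-1, 0, false)).1

-- ===== PRECONDITION & SPEC =====
def Spec_solution (S : String) (out : Int) : Prop := out = solution_alt S
instance (S : String) (out : Int) : Decidable (Spec_solution S out) := by unfold Spec_solution; infer_instance

-- ===== CLAIM (what is proved, stated in full; the proofs are below) =====
def Claim_equal_solution : Prop := ∀ (S : String), Dom_solution S → Spec_solution S (solution S)

-- ===== LEMMAS AND PROOFS =====

-- character classes and the membership tests A performs
def pvDig (c : Char) : Bool := decide ('0' ≤ c ∧ c ≤ '9')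
def pvUp (c : Char) : Bool := decide ('A' ≤ c ∧ c ≤ 'Z')

def pvValid (t : List Char) : Bool := t.all (fun c => !pvDig c) && t.any pvUp
def pvScore (t : List Char) : Int := if pvValid t then (t.length : Int) else -1
-- max of scores over a list of candidate substrings
def pvM (ts : List (List Char)) : Int := ts.foldl (fun s t => max s (pvScore t)) (-1)
-- reference value: max score over all infixes
def pvG (L : List Char) : Int := pvM (L.tails.flatMap List.inits)

def pvCur (L : List Char) : Int := L.foldl (fun n c => if pvDig c then 0 else n + 1) 0
def pvHU (L : List Char) : Bool := L.foldl (fun h c => if pvDig c then false else h || pvUp c) false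

theorem char_eq_iff (c d : Char) : (c = d) ↔ c.toNat = d.toNat := by
  rw [Char.ext_iff, ← UInt32.toNat_inj]; rfl
theorem char_le_iff (c d : Char) : (c ≤ d) ↔ c.toNat ≤ d.toNat := by
  rw [Char.le_def, UInt32.le_iff_toNat_le_toNat]; rfl

theorem pv_mem_digits (c : Char) : (pvDigits.contains c) = pvDig c := by
  rw [Bool.eq_iff_iff]
  simp only [pvDigits, pvDig, List.contains_cons, List.contains_nil, Bool.or_eq_true,
    beq_iff_eq, decide_eq_true_eq, Bool.false_eq_true, or_false, char_eq_iff, char_le_iff]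
  have hd0 : ('0':Char).toNat = 48 := by decide
  have hd1 : ('1':Char).toNat = 49 := by decide
  have hd2 : ('2':Char).toNat = 50 := by decide
  have hd3 : ('3':Char).toNat = 51 := by decide
  have hd4 : ('4':Char).toNat = 52 := by decide
  have hd5 : ('5':Char).toNat = 53 := by decide
  have hd6 : ('6':Char).toNat = 54 := by decide
  have hd7 : ('7':Char).toNat = 55 := by decide
  have hd8 : ('8':Char).toNat = 56 := by decide
  have hd9 : ('9':Char).toNat = 57 := by decide
  simp only [hd0, hd1, hd2, hd3, hd4, hd5, hd6, hd7, hd8, hd9]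
  omega

theorem pv_mem_uppers (c : Char) : (pvUpperChars.contains c) = pvUp c := by
  rw [Bool.eq_iff_iff]
  simp only [pvUpperChars, pvUp, List.contains_cons, List.contains_nil, Bool.or_eq_true,
    beq_iff_eq, decide_eq_true_eq, Bool.false_eq_true, or_false, char_eq_iff, char_le_iff]
  have hu0 : ('A':Char).toNat = 65 := by decide
  have hu1 : ('B':Char).toNat = 66 := by decide
  have hu2 : ('C':Char).toNat = 67 := by decide
  have hu3 : ('D':Char).toNat = 68 := by decide
  have hu4 : ('E':Char).toNat = 69 := by decide
  have hu5 : ('F':Char).toNat = 70 := by decide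
  have hu6 : ('G':Char).toNat = 71 := by decide
  have hu7 : ('H':Char).toNat = 72 := by decide
  have hu8 : ('I':Char).toNat = 73 := by decide
  have hu9 : ('J':Char).toNat = 74 := by decide
  have hu10 : ('K':Char).toNat = 75 := by decide
  have hu11 : ('L':Char).toNat = 76 := by decide
  have hu12 : ('M':Char).toNat = 77 := by decide
  have hu13 : ('N':Char).toNat = 78 := by decide
  have hu14 : ('O':Char).toNat = 79 := by decide
  have hu15 : ('P':Char).toNat = 80 := by decide
  have hu16 : ('Q':Char).toNat = 81 := by decide
  have hu17 : ('R':Char).toNat = 82 := by decide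
  have hu18 : ('S':Char).toNat = 83 := by decide
  have hu19 : ('T':Char).toNat = 84 := by decide
  have hu20 : ('U':Char).toNat = 85 := by decide
  have hu21 : ('V':Char).toNat = 86 := by decide
  have hu22 : ('W':Char).toNat = 87 := by decide
  have hu23 : ('X':Char).toNat = 88 := by decide
  have hu24 : ('Y':Char).toNat = 89 := by decide
  have hu25 : ('Z':Char).toNat = 90 := by decide
  simp only [hu0, hu1, hu2, hu3, hu4, hu5, hu6, hu7, hu8, hu9, hu10, hu11, hu12, hu13, hu14, hu15, hu16, hu17, hu18, hu19, hu20, hu21, hu22, hu23, hu24, hu25]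
  omega

theorem pv_any_contains (cs : List Char) (p : Char → Bool)
    (hp : ∀ c, cs.contains c = p c) (t : List Char) :
    cs.any (fun d => t.contains d) = t.any p := by
  rw [Bool.eq_iff_iff]
  simp only [List.any_eq_true]
  constructor
  · rintro ⟨d, hd, ht⟩
    have := List.contains_iff_mem.mp ht
    exact ⟨d, this, by rw [← hp d]; exact List.contains_iff_mem.mpr hd⟩
  · rintro ⟨c, hc, hpc⟩
    have : c ∈ cs := List.contains_iff_mem.mp (by rw [hp c]; exact hpc)
    exact ⟨c, this, List.contains_iff_mem.mpr hc⟩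

theorem pv_match_eq (t : List Char) : match_pwd_criteria t = pvValid t := by
  rw [match_pwd_criteria, pvValid, pv_any_contains pvDigits pvDig pv_mem_digits,
    pv_any_contains pvUpperChars pvUp pv_mem_uppers]
  by_cases h : t.any pvDig
  · have : t.all (fun c => !pvDig c) = false := by
      obtain ⟨c, hc, hd⟩ := List.any_eq_true.mp h
      exact List.all_eq_false.mpr ⟨c, hc, by simp [hd]⟩
    simp [h, this]
  · have : t.all (fun c => !pvDig c) = true := by
      simp only [List.all_eq_true, Bool.not_eq_true']
      intro c hc
      by_contra hne
      exact h (List.any_eq_true.mpr ⟨c, hc, by simpa using hne⟩)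
    simp [h, this]

theorem pvScore_ge (t : List Char) : -1 ≤ pvScore t := by
  rw [pvScore]; split <;> omega

theorem pvM_ge (ts : List (List Char)) : -1 ≤ pvM ts :=
  (PySem.List.le_foldl_max_int ts pvScore (-1)).1

theorem pvfold_init (ts : List (List Char)) : ∀ a : Int, -1 ≤ a →
    ts.foldl (fun s t => max s (pvScore t)) a = max a (pvM ts) := by
  induction ts with
  | nil => intro a ha; rw [List.foldl_nil, pvM, List.foldl_nil]; omega
  | cons t ts ih =>
    intro a ha
    have hs := pvScore_ge t
    rw [List.foldl_cons, ih (max a (pvScore t)) (by omega)]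
    conv_rhs => rw [pvM, List.foldl_cons, show max (-1) (pvScore t) = pvScore t from by omega,
      ih (pvScore t) hs]
    omega

theorem pvM_append (xs ys : List (List Char)) : pvM (xs ++ ys) = max (pvM xs) (pvM ys) := by
  rw [pvM, List.foldl_append, ← pvM, pvfold_init ys (pvM xs) (pvM_ge xs)]

theorem pvM_singleton (t : List Char) : pvM [t] = pvScore t := by
  have := pvScore_ge t
  simp [pvM]; omega

theorem pvM_flatMap_append {α : Type} (ts : List α) (f g : α → List (List Char)) :
    pvM (ts.flatMap (fun t => f t ++ g t)) = max (pvM (ts.flatMap f)) (pvM (ts.flatMap g)) := by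
  induction ts with
  | nil => simp [pvM]
  | cons t ts ih =>
    simp only [List.flatMap_cons]
    rw [List.append_assoc, pvM_append, pvM_append, pvM_append, pvM_append, ih]
    omega

-- A's inner update, as a function of the built substring
def pvStepA (sol : Int) (t : List Char) : Int :=
  if match_pwd_criteria t then (if (t.length : Int) > sol then (t.length : Int) else sol) else sol

theorem pvStepA_eq (sol : Int) (t : List Char) (h : -1 ≤ sol) :
    pvStepA sol t = max sol (pvScore t) := by
  rw [pvStepA, pv_match_eq, pvScore]
  by_cases hv : pvValid t
  · simp only [hv, if_true]; omega
  · simp only [hv, Bool.false_eq_true, if_false]; omega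

theorem pvfoldA (ts : List (List Char)) : ∀ a : Int, -1 ≤ a →
    ts.foldl pvStepA a = ts.foldl (fun s t => max s (pvScore t)) a := by
  induction ts with
  | nil => intro a _; rfl
  | cons t ts ih =>
    intro a ha
    rw [List.foldl_cons, List.foldl_cons, pvStepA_eq a t ha]
    exact ih _ (by have := pvScore_ge t; omega)

theorem pv_foldl_flatMap {α : Type} (l : List α) (g : α → List (List Char)) :
    ∀ a : Int, l.foldl (fun s i => (g i).foldl pvStepA s) a = (l.flatMap g).foldl pvStepA a := by
  induction l with
  | nil => intro a; rfl
  | cons x l ih => intro a; rw [List.foldl_cons, List.flatMap_cons, List.foldl_append, ih]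

theorem pv_inits_eq_map_take {α : Type} (l : List α) :
    l.inits = (List.range (l.length + 1)).map (fun m => l.take m) := by
  induction l with
  | nil => rfl
  | cons a l ih =>
    rw [List.inits_cons, ih, List.length_cons]
    conv_rhs => rw [List.range_succ_eq_map]
    simp only [List.map_cons, List.map_map, List.take_zero, Function.comp_def,
      Nat.succ_eq_add_one, List.take_succ_cons]

theorem pv_tails_eq_map_drop {α : Type} (l : List α) :
    l.tails = (List.range (l.length + 1)).map (fun i => l.drop i) := by
  induction l with
  | nil => rfl
  | cons a l ih =>
    rw [List.tails_cons, ih, List.length_cons]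
    conv_rhs => rw [List.range_succ_eq_map]
    simp only [List.map_cons, List.map_map, List.drop_zero, Function.comp_def,
      Nat.succ_eq_add_one, List.drop_succ_cons]

-- the list of candidate substrings A enumerates, in A's order
def pvCands (L : List Char) : List (List Char) :=
  (List.range (L.length + 1)).flatMap
    (fun i => (List.range (L.length + 1 - i)).map (fun m => (L.drop i).take m))

theorem pvG_eq_M_cands (L : List Char) : pvG L = pvM (pvCands L) := by
  rw [pvG, pvCands, pv_tails_eq_map_drop, List.flatMap_map]
  congr 1
  apply List.flatMap_congr  -- maybe wrong name
  intro i hi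
  rw [pv_inits_eq_map_take, List.length_drop]
  congr 2
  have : i < L.length + 1 := List.mem_range.mp hi
  omega

-- pwd as built by A's innermost loop
theorem pv_pwd_eq (S : String) (i : Nat) : ∀ m : Nat, i + m ≤ S.toList.length →
    (PySem.List.pyRange (i : Int) ((i : Int) + (m : Int)) 1).foldl
      (fun acc k => match PySem.Str.pyGet? S k with
        | some c => acc ++ [c]
        | none => acc) [] = (S.toList.drop i).take m := by
  intro m
  induction m with
  | zero => intro _; simp [PySem.List.pyRange_one_eq_nil]
  | succ m ih =>
    intro h
    have h1 : (i : Int) + ((m : Nat) + 1 : Nat) = ((i : Int) + (m : Int)) + 1 := by push_cast; ring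
    rw [h1, PySem.List.pyRange_one_succ_right (by omega), List.foldl_append,
      ih (by omega)]
    have h2 : (i : Int) + (m : Int) = ((i + m : Nat) : Int) := by push_cast; ring
    have hlt : i + m < S.toList.length := by omega
    rw [List.foldl_cons, List.foldl_nil, h2, PySem.Str.pyGet?_natCast,
      List.getElem?_eq_getElem hlt]
    have hm : m < (S.toList.drop i).length := by rw [List.length_drop]; omega
    rw [List.take_add_one, List.getElem?_eq_getElem hm]
    simp [List.getElem_drop]


def pvBStep (st : Int × Int × Bool) (c : Char) : Int × Int × Bool :=
  let best := st.1
  let cur := st.2.1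
  let hasU := st.2.2
  if '0' ≤ c ∧ c ≤ '9' then (best, 0, false)
  else
    let cur := cur + 1
    let hasU := hasU || decide ('A' ≤ c ∧ c ≤ 'Z')
    if hasU ∧ cur > best then (cur, cur, hasU) else (best, cur, hasU)

theorem pv_alt_eq (S : String) : solution_alt S = (S.toList.foldl pvBStep (-1, 0, false)).1 := rfl

theorem pv_flatMap_singleton {α β : Type} (l : List α) (f : α → β) :
    l.flatMap (fun x => [f x]) = l.map f := by
  induction l <;> simp_all

theorem pvG_ge (L : List Char) : -1 ≤ pvG L := by rw [pvG]; exact pvM_ge _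

theorem pvCur_append (L : List Char) (c : Char) :
    pvCur (L ++ [c]) = if pvDig c then 0 else pvCur L + 1 := by
  rw [pvCur, List.foldl_append, List.foldl_cons, List.foldl_nil, ← pvCur]

theorem pvHU_append (L : List Char) (c : Char) :
    pvHU (L ++ [c]) = if pvDig c then false else pvHU L || pvUp c := by
  rw [pvHU, List.foldl_append, List.foldl_cons, List.foldl_nil, ← pvHU]

theorem pvCur_nonneg (L : List Char) : 0 ≤ pvCur L := by
  rw [pvCur]
  suffices h : ∀ a : Int, 0 ≤ a → 0 ≤ L.foldl (fun n c => if pvDig c then 0 else n + 1) a from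
    h 0 le_rfl
  induction L with
  | nil => intro a ha; exact ha
  | cons c L ih =>
    intro a ha
    rw [List.foldl_cons]
    exact ih _ (by split <;> omega)

-- max score over all suffixes t of L of (t ++ s)
def pvN (L s : List Char) : Int := pvM (L.tails.map (fun t => t ++ s))

theorem pvN_formula (L : List Char) : ∀ s : List Char,
    pvN L s = if s.all (fun c => !pvDig c) && (s.any pvUp || pvHU L)
              then pvCur L + (s.length : Int) else -1 := by
  induction L using List.reverseRecOn with
  | nil =>
    intro s
    rw [pvN, show ([] : List Char).tails = [[]] from rfl,
      show List.map (fun t => t ++ s) [[]] = [s] from by simp, pvM_singleton, pvScore, pvValid]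
    simp only [pvHU, List.foldl_nil, Bool.or_false, pvCur]
    split <;> omega
  | append_singleton L x ih =>
    intro s
    have h1 : (L ++ [x]).tails = (L.tails.map (fun t => t ++ [x])) ++ [[]] := by
      rw [List.tails_append]; rfl
    rw [pvN, h1, List.map_append, pvM_append, List.map_map]
    have h2 : ((fun t => t ++ s) ∘ fun t : List Char => t ++ [x]) = (fun t => t ++ (x :: s)) := by
      funext t; simp
    rw [h2, show (List.map (fun t => t ++ s) [([] : List Char)]) = [s] from by simp, ← pvN,
      ih (x :: s), pvM_singleton, pvScore, pvValid, pvCur_append, pvHU_append]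
    have hc := pvCur_nonneg L
    have hl : (0 : Int) ≤ (s.length : Int) := Int.natCast_nonneg _
    by_cases hdx : pvDig x <;> by_cases hax : s.all (fun c => !pvDig c) <;>
      by_cases hup : pvUp x <;> by_cases hany : s.any pvUp <;> by_cases hhu : pvHU L <;>
        simp only [hdx, hax, hup, hany, hhu, List.all_cons, List.any_cons, List.length_cons,
          Bool.not_true, Bool.not_false, Bool.and_true, Bool.and_false, Bool.or_true,
          Bool.or_false, if_true, if_false, Bool.false_eq_true, Nat.cast_add, Nat.cast_one] <;>
        omega

theorem pvG_append (L : List Char) (c : Char) : pvG (L ++ [c]) = max (pvG L) (pvN L [c]) := by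
  rw [pvG, List.tails_append, show (List.tails [c]).tail = [([] : List Char)] from rfl,
    List.flatMap_append, pvM_append, List.flatMap_map]
  have h3 : (fun t : List Char => (t ++ [c]).inits) =
      (fun t : List Char => t.inits ++ [t ++ [c]]) := by
    funext t; rw [List.inits_append]; rfl
  rw [h3, pvM_flatMap_append, pv_flatMap_singleton, ← pvG, ← pvN,
    show (List.flatMap List.inits [([] : List Char)]) = [[]] from rfl, pvM_singleton]
  have h4 : pvScore [] = -1 := rfl
  have := pvG_ge L
  have : -1 ≤ pvN L [c] := pvM_ge _
  rw [h4]
  omega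

theorem pvB_state (L : List Char) :
    L.foldl pvBStep (-1, 0, false) = (pvG L, pvCur L, pvHU L) := by
  induction L using List.reverseRecOn with
  | nil => rfl
  | append_singleton L x ih =>
    rw [List.foldl_append, ih, List.foldl_cons, List.foldl_nil, pvG_append, pvN_formula,
      pvCur_append, pvHU_append, pvBStep]
    have hg := pvG_ge L
    have hc := pvCur_nonneg L
    have ha1 : [x].all (fun c => !pvDig c) = !pvDig x := by simp
    have ha2 : [x].any pvUp = pvUp x := by simp
    by_cases hd : ('0' ≤ x ∧ x ≤ '9')
    · have hdx : pvDig x = true := decide_eq_true hd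
      rw [if_pos hd]
      simp only [ha1, hdx, Bool.not_true, Bool.false_and, Bool.false_eq_true, if_false, if_true]
      rw [show max (pvG L) (-1) = pvG L from by omega]
    · have hdx : pvDig x = false := decide_eq_false hd
      rw [if_neg hd, show decide ('A' ≤ x ∧ x ≤ 'Z') = pvUp x from rfl]
      simp only [ha1, ha2, hdx, Bool.not_false, Bool.true_and, Bool.false_eq_true, if_false,
        List.length_cons, List.length_nil, Nat.cast_add, Nat.cast_zero, Nat.cast_one, zero_add]
      by_cases hu : (pvHU L || pvUp x) = true
      · have hu2 : (pvUp x || pvHU L) = true := by rwa [Bool.or_comm] at hu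
        simp only [hu, hu2, if_true, true_and]
        by_cases hgt : pvCur L + 1 > pvG L
        · rw [if_pos hgt, show max (pvG L) (pvCur L + 1) = pvCur L + 1 from by omega]
        · rw [if_neg hgt, show max (pvG L) (pvCur L + 1) = pvG L from by omega]
      · have hu1 : (pvHU L || pvUp x) = false := by
          cases hb : (pvHU L || pvUp x) with
          | false => rfl
          | true => exact absurd hb hu
        have hu2 : (pvUp x || pvHU L) = false := by rwa [Bool.or_comm] at hu1
        simp only [hu1, hu2, Bool.false_eq_true, false_and, if_false]
        rw [show max (pvG L) (-1) = pvG L from by omega]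

theorem pv_A_eq_cands (S : String) :
    solution S = (pvCands S.toList).foldl pvStepA (-1) := by
  simp only [solution, PySem.Str.len_eq]
  rw [pvCands, ← pv_foldl_flatMap]
  have hcast : ((S.toList.length : Int) + 1) = ((S.toList.length + 1 : Nat) : Int) := by
    push_cast; ring
  rw [hcast, PySem.List.pyRange_zero_natCast, List.foldl_map]
  apply PySem.List.foldl_congr_mem
  intro sol i hi
  have hi' : i < S.toList.length + 1 := List.mem_range.mp hi
  rw [PySem.List.pyRange_one, List.foldl_map,
    show (((S.toList.length + 1 : Nat) : Int) - (i : Int)).toNat = S.toList.length + 1 - i from by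
      omega,
    List.foldl_map]
  apply PySem.List.foldl_congr_mem
  intro sol' k hk
  have hk' : k < S.toList.length + 1 - i := List.mem_range.mp hk
  rw [pv_pwd_eq S i k (by omega)]
  rfl

theorem pv_A_eq_G (S : String) : solution S = pvG S.toList := by
  rw [pv_A_eq_cands, pvfoldA _ _ le_rfl, ← pvM, ← pvG_eq_M_cands]

theorem pv_B_eq_G (S : String) : solution_alt S = pvG S.toList := by
  rw [pv_alt_eq, pvB_state]



-- ===== VERDICT (by name: the statement is the Claim_ definition above) =====
theorem solution_spec : Claim_equal_solution := by
  intro S _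
  unfold Spec_solution
  rw [pv_A_eq_G, pv_B_eq_G]
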